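-- pv_equiv track=rewrite | github.com/kaisersong/slide-creator | scripts/validate_html.py | _mask_js_comments_and_strings
-- ===== SOURCE A (Python) =====
-- def _mask_js_comments_and_strings(source: str) -> str:
--     """Mask JS comments and string contents so structural regexes ignore spoof text."""
--     result: list[str] = []
--     i = 0
--     state = "code"
--     quote = ""
--
--     while i < len(source):
--         ch = source[i]
--         nxt = source[i + 1] if i + 1 < len(source) else ""
--
--         if state == "code":
--             if ch == "/" and nxt == "/":
--                 result.extend([" ", " "])
--                 i += 2
--                 state = "line_comment"
--                 continue
--             if ch == "/" and nxt == "*":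
--                 result.extend([" ", " "])
--                 i += 2
--                 state = "block_comment"
--                 continue
--             if ch in ("'", '"', "`"):
--                 result.append(" ")
--                 i += 1
--                 state = "string"
--                 quote = ch
--                 continue
--             result.append(ch)
--             i += 1
--             continue
--
--         if state == "line_comment":
--             if ch == "\n":
--                 result.append("\n")
--                 i += 1
--                 state = "code"
--             else:
--                 result.append(" ")
--                 i += 1
--             continue
--
--         if state == "block_comment":
--             if ch == "*" and nxt == "/":
--                 result.extend([" ", " "])
--                 i += 2
--                 state = "code"
--             else:
--                 result.append("\n" if ch == "\n" else " ")
--                 i += 1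
--             continue
--
--         # string
--         if ch == "\\":
--             result.append(" ")
--             i += 1
--             if i < len(source):
--                 result.append("\n" if source[i] == "\n" else " ")
--                 i += 1
--             continue
--         if ch == quote:
--             result.append(" ")
--             i += 1
--             state = "code"
--             quote = ""
--             continue
--         result.append("\n" if ch == "\n" else " ")
--         i += 1
--
--     return "".join(result)
-- ===== SOURCE B (Python) =====
-- def _mask_js_comments_and_strings(source: str) -> str:
--     """Token-span scanner: jump to each comment/string end with find() and
--     mask whole slices at once (space except newlines), instead of a
--     character-by-character state machine."""
--     n = len(source)
--     out: list[str] = []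
--     i = 0
--     while i < n:
--         ch = source[i]
--         if ch == "/" and source.startswith("//", i):
--             j = source.find("\n", i + 2)
--             end = n if j == -1 else j + 1
--         elif ch == "/" and source.startswith("/*", i):
--             j = source.find("*/", i + 2)
--             end = n if j == -1 else j + 2
--         elif ch in "'\"`":
--             j = i + 1
--             while j < n:
--                 if source[j] == "\\":
--                     j += 2
--                 elif source[j] == ch:
--                     j += 1
--                     break
--                 else:
--                     j += 1
--             end = min(j, n)
--         else:
--             out.append(ch)
--             i += 1
--             continue
--         out.append("".join("\n" if c == "\n" else " " for c in source[i:end]))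
--         i = end
--     return "".join(out)
-- ===== Notes on version B (the rewrite author's own statement) =====
-- stated objective: faster
-- what changed: Replaced the character-by-character state machine (explicit state variable cycling through code/line_comment/block_comment/string) by a stateless token-span scanner that locates each comment/string end with find()/startswith and masks the whole slice at once.
import Mathlib
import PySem

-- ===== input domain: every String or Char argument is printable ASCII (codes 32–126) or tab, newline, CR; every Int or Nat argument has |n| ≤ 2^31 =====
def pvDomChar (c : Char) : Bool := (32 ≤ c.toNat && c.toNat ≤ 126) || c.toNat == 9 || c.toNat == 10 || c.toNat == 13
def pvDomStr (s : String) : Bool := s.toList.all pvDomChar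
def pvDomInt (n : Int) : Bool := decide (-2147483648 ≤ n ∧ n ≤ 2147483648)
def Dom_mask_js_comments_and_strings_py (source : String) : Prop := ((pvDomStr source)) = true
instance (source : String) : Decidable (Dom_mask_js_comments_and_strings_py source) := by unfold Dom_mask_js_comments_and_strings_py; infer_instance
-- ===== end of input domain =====

-- B replaces A's character-by-character state machine by a stateless token-span scanner
-- (locate each comment/string end, mask the whole span at once); same output, alternative structure.

-- ===== PORT A =====
-- A's states: "code" | "line_comment" | "block_comment" | "string" (with its quote char)
inductive PvStA where
  | code
  | lineC
  | blockC
  | str : Char → PvStA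
deriving DecidableEq, Repr

-- '"\n" if ch == "\n" else " "'
def pvMaskNl (c : Char) : Char := if c = '\n' then '\n' else ' '

-- A's while loop, step for step (the two-char patterns are the ch/nxt lookahead)
def pvRunA : PvStA → List Char → List Char
  | _, [] => []
  | .code, '/'::'/'::t => ' ' :: ' ' :: pvRunA .lineC t
  | .code, '/'::'*'::t => ' ' :: ' ' :: pvRunA .blockC t
  | .code, c::t =>
      if c = '\'' ∨ c = '"' ∨ c = '`' then ' ' :: pvRunA (.str c) t
      else c :: pvRunA .code t
  | .lineC, c::t => if c = '\n' then '\n' :: pvRunA .code t else ' ' :: pvRunA .lineC t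
  | .blockC, '*'::'/'::t => ' ' :: ' ' :: pvRunA .code t
  | .blockC, c::t => pvMaskNl c :: pvRunA .blockC t
  | .str _, '\\'::[] => [' ']
  | .str q, '\\'::d::t => ' ' :: pvMaskNl d :: pvRunA (.str q) t
  | .str q, c::t => if c = q then ' ' :: pvRunA .code t else pvMaskNl c :: pvRunA (.str q) t

def mask_js_comments_and_strings_py (source : String) : String :=
  String.mk (pvRunA .code source.toList)

-- ===== PORT B =====
-- B's 'source.find("\n", i+2)': split off the span up to and including the next newline
def pvLineSplit : List Char → List Char × List Char
  | [] => ([], [])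
  | c::t => if c = '\n' then ([c], t) else
      let p := pvLineSplit t; (c :: p.1, p.2)

-- B's 'source.find("*/", i+2)': split off the span up to and including the next "*/"
def pvBlockSplit : List Char → List Char × List Char
  | [] => ([], [])
  | '*'::'/'::t => (['*', '/'], t)
  | c::t => let p := pvBlockSplit t; (c :: p.1, p.2)

-- B's inner while loop finding the string end (backslash consumes the next char)
def pvStrSplit (q : Char) : List Char → List Char × List Char
  | [] => ([], [])
  | '\\'::[] => (['\\'], [])
  | '\\'::d::t => let p := pvStrSplit q t; ('\\' :: d :: p.1, p.2)
  | c::t => if c = q then ([c], t) else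
      let p := pvStrSplit q t; (c :: p.1, p.2)

theorem pvLineSplit_len (t : List Char) : (pvLineSplit t).2.length ≤ t.length := by
  induction t with
  | nil => simp [pvLineSplit]
  | cons c t ih => simp only [pvLineSplit]; split <;> simp <;> omega

theorem pvBlockSplit_len (t : List Char) : (pvBlockSplit t).2.length ≤ t.length := by
  induction t using pvBlockSplit.induct with
  | case1 => simp [pvBlockSplit]
  | case2 t => simp [pvBlockSplit]; omega
  | case3 c t h ih => rw [pvBlockSplit.eq_def]; split <;> simp_all <;> omega

theorem pvStrSplit_len (q : Char) (t : List Char) : (pvStrSplit q t).2.length ≤ t.length := by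
  induction t using pvStrSplit.induct q with
  | case1 => simp [pvStrSplit]
  | case2 => simp [pvStrSplit]
  | case3 d t ih => simp only [pvStrSplit]; simp; omega
  | case4 t h1 h2 => rw [pvStrSplit.eq_def]; split <;> simp_all <;> omega
  | case5 c t h1 h2 h3 ih => rw [pvStrSplit.eq_def]; split <;> simp_all <;> omega

-- B's outer loop: copy code characters, mask whole token spans at once
def pvRunB : List Char → List Char
  | [] => []
  | '/'::'/'::t =>
      let p := pvLineSplit t
      (('/'::'/'::p.1).map pvMaskNl) ++ pvRunB p.2
  | '/'::'*'::t =>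
      let p := pvBlockSplit t
      (('/'::'*'::p.1).map pvMaskNl) ++ pvRunB p.2
  | c::t =>
      if c = '\'' ∨ c = '"' ∨ c = '`' then
        let p := pvStrSplit c t
        ((c::p.1).map pvMaskNl) ++ pvRunB p.2
      else c :: pvRunB t
termination_by l => l.length
decreasing_by
  · have := pvLineSplit_len t; simp; omega
  · have := pvBlockSplit_len t; simp; omega
  · have := pvStrSplit_len c t; simp; omega
  · simp

def mask_js_comments_and_strings_py_alt (source : String) : String :=
  String.mk (pvRunB source.toList)

-- ===== PRECONDITION & SPEC =====
def Spec_mask_js_comments_and_strings_py (source : String) (out : String) : Prop := out = mask_js_comments_and_strings_py_alt source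
instance (source : String) (out : String) : Decidable (Spec_mask_js_comments_and_strings_py source out) := by unfold Spec_mask_js_comments_and_strings_py; infer_instance

-- ===== CLAIM (what is proved, stated in full; the proofs are below) =====
def Claim_equal_mask_js_comments_and_strings_py : Prop := ∀ (source : String), Dom_mask_js_comments_and_strings_py source → Spec_mask_js_comments_and_strings_py source (mask_js_comments_and_strings_py source)

-- ===== LEMMAS AND PROOFS =====

-- A's line_comment state emits exactly the masked line span, then resumes in code
theorem pvRunA_lineC (t : List Char) :
    pvRunA .lineC t = (pvLineSplit t).1.map pvMaskNl ++ pvRunA .code (pvLineSplit t).2 := by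
  induction t with
  | nil => simp [pvRunA, pvLineSplit]
  | cons c t ih =>
    by_cases h : c = '\n' <;> simp [pvRunA, pvLineSplit, h, pvMaskNl, ih]

-- A's block_comment state emits exactly the masked block span, then resumes in code
theorem pvRunA_blockC (t : List Char) :
    pvRunA .blockC t = (pvBlockSplit t).1.map pvMaskNl ++ pvRunA .code (pvBlockSplit t).2 := by
  induction t using pvBlockSplit.induct with
  | case1 => simp [pvRunA, pvBlockSplit]
  | case2 t => simp [pvRunA, pvBlockSplit, pvMaskNl]
  | case3 c t h ih =>
    have hA : pvRunA .blockC (c::t) = pvMaskNl c :: pvRunA .blockC t := by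
      rw [pvRunA.eq_def]; split <;> simp_all
    have hB : pvBlockSplit (c::t) = (c :: (pvBlockSplit t).1, (pvBlockSplit t).2) := by
      rw [pvBlockSplit.eq_def]; split <;> simp_all
    rw [hA, hB, ih]; simp

-- A's string state emits exactly the masked string span, then resumes in code
theorem pvRunA_str (q : Char) (hq : q ≠ '\n') (t : List Char) :
    pvRunA (.str q) t = (pvStrSplit q t).1.map pvMaskNl ++ pvRunA .code (pvStrSplit q t).2 := by
  induction t using pvStrSplit.induct q with
  | case1 => simp [pvRunA, pvStrSplit]
  | case2 => simp [pvRunA, pvStrSplit, pvMaskNl]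
  | case3 d t ih => simp [pvRunA, pvStrSplit, pvMaskNl, ih]
  | case4 t h1 h2 =>
    have hA : pvRunA (.str q) (q::t) = ' ' :: pvRunA .code t := by
      rw [pvRunA.eq_def]; split <;> simp_all
    have hB : pvStrSplit q (q::t) = ([q], t) := by
      rw [pvStrSplit.eq_def]; split <;> simp_all
    rw [hA, hB]; simp [pvMaskNl, hq]
  | case5 c t h1 h2 h3 ih =>
    have hA : pvRunA (.str q) (c::t) = pvMaskNl c :: pvRunA (.str q) t := by
      rw [pvRunA.eq_def]; split <;> simp_all
    have hB : pvStrSplit q (c::t) = (c :: (pvStrSplit q t).1, (pvStrSplit q t).2) := by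
      rw [pvStrSplit.eq_def]; split <;> simp_all
    rw [hA, hB, ih]; simp

-- the main lemma: the state machine from "code" equals the span scanner
theorem pvRunA_eq_pvRunB (l : List Char) : pvRunA .code l = pvRunB l := by
  induction l using pvRunB.induct with
  | case1 => simp [pvRunA, pvRunB]
  | case2 t p ih =>
    have hp : p = pvLineSplit t := rfl
    rw [hp] at ih
    rw [pvRunB, pvRunA, pvRunA_lineC, ih]
    simp [pvMaskNl]
  | case3 t p ih =>
    have hp : p = pvBlockSplit t := rfl
    rw [hp] at ih
    rw [pvRunB, pvRunA, pvRunA_blockC, ih]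
    simp [pvMaskNl]
  | case4 c t h1 h2 hq p ih =>
    have hp : p = pvStrSplit c t := rfl
    rw [hp] at ih
    rcases hq with rfl | rfl | rfl
    · simp [pvRunA, pvRunB, pvMaskNl]
      rw [pvRunA_str '\'' (by decide), ih]
    · simp [pvRunA, pvRunB, pvMaskNl]
      rw [pvRunA_str '"' (by decide), ih]
    · simp [pvRunA, pvRunB, pvMaskNl]
      rw [pvRunA_str '`' (by decide), ih]
  | case5 c t h1 h2 hq ih =>
    have hA : pvRunA .code (c::t) = c :: pvRunA .code t := by
      rw [pvRunA.eq_def]; split <;> simp_all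
    have hB : pvRunB (c::t) = c :: pvRunB t := by
      rw [pvRunB.eq_def]; split <;> simp_all
    rw [hA, hB, ih]

-- ===== VERDICT (by name: the statement is the Claim_ definition above) =====
theorem mask_js_comments_and_strings_py_spec : Claim_equal_mask_js_comments_and_strings_py := by
  intro source _
  unfold Spec_mask_js_comments_and_strings_py mask_js_comments_and_strings_py mask_js_comments_and_strings_py_alt
  rw [pvRunA_eq_pvRunB]
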